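-- pv_equiv track=rewrite | github.com/ClaudiuIoanMaftei/toxic-spans-detection | src/server/core/ml/utils.py | spans_to_words
-- ===== SOURCE A (Python) =====
-- def spans_to_words(spans, text):
--
--     toxic_words = []
--     curr_word = ""
--     last_idx = 0
--     if len(spans) > 0:
--         last_idx = spans[0]
--
--     for idx in spans:
--         if idx > last_idx + 1:
--             toxic_words += curr_word.split(" ")
--             curr_word = text[idx]
--         else:
--             curr_word += text[idx]
--         last_idx = idx
--     if curr_word != "":
--         toxic_words += curr_word.split(" ")
--
--     return toxic_words
-- ===== SOURCE B (Python) =====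
-- def spans_to_words(spans, text):
--     toxic_words = []
--     for g in _groups(spans):
--         toxic_words.extend(''.join(text[i] for i in g).split(' '))
--     return toxic_words
--
--
-- def _groups(spans):
--     """Partition spans into runs of indices, starting a new run whenever the
--     gap to the previous index exceeds 1."""
--     groups = []
--     cur = []
--     for idx in spans:
--         if cur and idx > cur[-1] + 1:
--             groups.append(cur)
--             cur = [idx]
--         else:
--             cur.append(idx)
--     if cur:
--         groups.append(cur)
--     return groups
-- ===== Notes on version B (the rewrite author's own statement) =====
-- stated objective: alternative
-- what changed: B replaces A's single running-accumulator loop (building a current word string and splitting on the fly) by a two-pass group-then-map decomposition: first partition the span indices into runs where the gap to the previous index is at most 1, then join each run's characters and split on spaces.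
import Mathlib
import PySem

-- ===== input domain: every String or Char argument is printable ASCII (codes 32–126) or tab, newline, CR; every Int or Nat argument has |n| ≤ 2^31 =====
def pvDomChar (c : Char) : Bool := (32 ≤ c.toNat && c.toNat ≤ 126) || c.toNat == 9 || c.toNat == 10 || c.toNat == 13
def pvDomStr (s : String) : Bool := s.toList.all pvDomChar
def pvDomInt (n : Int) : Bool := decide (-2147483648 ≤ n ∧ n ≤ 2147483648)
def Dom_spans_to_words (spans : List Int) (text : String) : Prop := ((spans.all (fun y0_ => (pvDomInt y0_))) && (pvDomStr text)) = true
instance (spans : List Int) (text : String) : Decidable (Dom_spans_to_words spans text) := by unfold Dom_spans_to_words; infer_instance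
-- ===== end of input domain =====

-- B replaces A's single running-accumulator loop by a two-pass decomposition (group the
-- indices into runs, then join-and-split each run); same cost, alternative structure.
-- Strings are handled as lists of code points via PySem (text[i] = pyGetD, split = Chars.splitOn).

-- ===== PORT A =====
-- loop body of A: state = (toxic_words, curr_word chars, last_idx)
def pvStepA (cs : List Char) (s : List String × List Char × Int) (idx : Int) :
    List String × List Char × Int :=
  if idx > s.2.2 + 1 then
    (s.1 ++ (PySem.Chars.splitOn s.2.1 [' ']).map String.ofList,
     [PySem.List.pyGetD cs idx ' '], idx)
  else
    (s.1, s.2.1 ++ [PySem.List.pyGetD cs idx ' '], idx)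

def spans_to_words (spans : List Int) (text : String) : List String :=
  let last0 : Int := match spans with | [] => 0 | i :: _ => i
  let st := spans.foldl (pvStepA text.toList) ([], [], last0)
  if st.2.1 ≠ [] then st.1 ++ (PySem.Chars.splitOn st.2.1 [' ']).map String.ofList else st.1

-- ===== PORT B =====
-- loop body of _groups: state = (groups, cur)
def pvStepB (s : List (List Int) × List Int) (idx : Int) : List (List Int) × List Int :=
  if s.2 ≠ [] ∧ idx > s.2.getLastD 0 + 1 then (s.1 ++ [s.2], [idx]) else (s.1, s.2 ++ [idx])

def pvGroups (spans : List Int) : List (List Int) :=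
  let st := spans.foldl pvStepB ([], [])
  if st.2 ≠ [] then st.1 ++ [st.2] else st.1

def spans_to_words_alt (spans : List Int) (text : String) : List String :=
  (pvGroups spans).foldl
    (fun acc g =>
      acc ++ (PySem.Chars.splitOn (g.map (fun i => PySem.List.pyGetD text.toList i ' ')) [' ']).map String.ofList)
    []

-- ===== PRECONDITION & SPEC =====
-- Pre_ excludes exactly the inputs where Python's text[idx] raises IndexError
-- (an index outside -len(text) ≤ idx < len(text)).
def Pre_spans_to_words (spans : List Int) (text : String) : Prop :=
  ∀ i ∈ spans, PySem.Raise.InRange text.toList.length i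
instance (spans : List Int) (text : String) : Decidable (Pre_spans_to_words spans text) := by
  unfold Pre_spans_to_words; infer_instance
def pvWitness_spans_to_words : List Int × String := ([0, 1, 2, 5, 6], "ab c defg")

def Spec_spans_to_words (spans : List Int) (text : String) (out : List String) : Prop := out = spans_to_words_alt spans text
instance (spans : List Int) (text : String) (out : List String) : Decidable (Spec_spans_to_words spans text out) := by unfold Spec_spans_to_words; infer_instance

-- ===== CLAIM (what is proved, stated in full; the proofs are below) =====
def Claim_equal_spans_to_words : Prop := ∀ (spans : List Int) (text : String), Dom_spans_to_words spans text → Pre_spans_to_words spans text → Spec_spans_to_words spans text (spans_to_words spans text)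

-- ===== LEMMAS AND PROOFS =====

-- the words contributed by a list of groups (what B's second loop produces)
def pvWordsOf (cs : List Char) (gs : List (List Int)) : List String :=
  gs.flatMap (fun g => (PySem.Chars.splitOn (g.map (fun i => PySem.List.pyGetD cs i ' ')) [' ']).map String.ofList)

lemma pvWordsOf_concat (cs : List Char) (gs : List (List Int)) (g : List Int) :
    pvWordsOf cs (gs ++ [g]) =
      pvWordsOf cs gs ++ (PySem.Chars.splitOn (g.map (fun i => PySem.List.pyGetD cs i ' ')) [' ']).map String.ofList := by
  simp [pvWordsOf]

-- the two left folds run in lockstep: A's state is the image of B's state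
lemma pvFold_rel (cs : List Char) :
    ∀ (xs : List Int) (gs : List (List Int)) (cur : List Int), cur ≠ [] →
      List.foldl (pvStepA cs) (pvWordsOf cs gs, cur.map (fun i => PySem.List.pyGetD cs i ' '), cur.getLastD 0) xs
        = (pvWordsOf cs (List.foldl pvStepB (gs, cur) xs).1,
           (List.foldl pvStepB (gs, cur) xs).2.map (fun i => PySem.List.pyGetD cs i ' '),
           (List.foldl pvStepB (gs, cur) xs).2.getLastD 0)
      ∧ (List.foldl pvStepB (gs, cur) xs).2 ≠ [] := by
  intro xs
  induction xs with
  | nil => intro gs cur h; exact ⟨rfl, h⟩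
  | cons y ys ih =>
    intro gs cur h
    by_cases hc : cur.getLast?.getD 0 + 1 < y
    · simpa [pvStepA, pvStepB, h, hc, pvWordsOf_concat] using ih (gs ++ [cur]) [y] (by simp)
    · simpa [pvStepA, pvStepB, h, hc] using ih gs (cur ++ [y]) (by simp)

lemma pvAlt_eq_wordsOf (spans : List Int) (text : String) :
    spans_to_words_alt spans text = pvWordsOf text.toList (pvGroups spans) := by
  simp [spans_to_words_alt, pvWordsOf, List.flatMap_def]

-- ===== VERDICT (by name: the statement is the Claim_ definition above) =====
theorem spans_to_words_spec : Claim_equal_spans_to_words := by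
  intro spans text _ _
  unfold Spec_spans_to_words
  rw [pvAlt_eq_wordsOf]
  cases spans with
  | nil => rfl
  | cons x xs =>
    have h0A : pvStepA text.toList ([], [], x) x
        = (pvWordsOf text.toList [], [x].map (fun i => PySem.List.pyGetD text.toList i ' '), ([x] : List Int).getLastD 0) := by
      simp [pvStepA, pvWordsOf]
    have h0B : pvStepB ([], []) x = ([], [x]) := by simp [pvStepB]
    obtain ⟨heq, hne⟩ := pvFold_rel text.toList xs [] [x] (by simp)
    unfold spans_to_words pvGroups
    simp only [List.foldl_cons, h0A, h0B, heq]
    simp [hne, pvWordsOf_concat]
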